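-- pv_equiv track=rewrite | github.com/triphoppingman/rgbledcontrol.py | src/ledlib/LedLightMagicBulb.py | addChkSum
-- ===== SOURCE A (Python) =====
-- def addChkSum(bin_list):
--   chksum = 0
--   for idx,val in enumerate(bin_list):
--     if val < 0:
--       val = -val + 128
--       bin_list[idx] = val
--
--     chksum += val
--
--   chksum &= 0xff
--   bin_list.append(chksum)
--   return bin_list
-- ===== SOURCE B (Python) =====
-- def addChkSum(bin_list):
--   # Checksum derived from the ORIGINAL values via the algebraic identity
--   # normalized(v) = v + (128 - 2*v when v < 0), so no pass over the
--   # normalized list is needed; normalization is then a separate in-place fix-up.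
--   negs = [v for v in bin_list if v < 0]
--   chksum = (sum(bin_list) + 128 * len(negs) - 2 * sum(negs)) & 0xff
--   for i, v in enumerate(bin_list):
--     if v < 0:
--       bin_list[i] = 128 - v
--   bin_list.append(chksum)
--   return bin_list
-- ===== Notes on version B (the rewrite author's own statement) =====
-- stated objective: alternative
-- what changed: The checksum is computed from the ORIGINAL list by the algebraic identity sum(normalized) = sum(orig) + 128*#negatives - 2*sum(negatives), instead of summing the normalized values; normalization becomes an independent in-place fix-up loop that the checksum never reads.
import Mathlib
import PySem

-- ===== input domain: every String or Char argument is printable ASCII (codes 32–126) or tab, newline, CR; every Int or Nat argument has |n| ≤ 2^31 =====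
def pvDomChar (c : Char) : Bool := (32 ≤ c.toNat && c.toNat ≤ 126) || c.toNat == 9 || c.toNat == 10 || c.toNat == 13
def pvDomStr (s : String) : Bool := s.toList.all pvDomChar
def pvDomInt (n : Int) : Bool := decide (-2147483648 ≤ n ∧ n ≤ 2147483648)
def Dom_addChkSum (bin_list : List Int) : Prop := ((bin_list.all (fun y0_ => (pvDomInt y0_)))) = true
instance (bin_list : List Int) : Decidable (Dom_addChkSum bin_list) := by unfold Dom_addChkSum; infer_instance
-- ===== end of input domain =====

-- B computes the checksum from the ORIGINAL values via an algebraic identity and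
-- normalizes separately; both programs mutate the argument list in place, so the
-- equivalence proved here is about the return value only.

-- ===== PORT A =====
-- One fused loop: rebuild the list element by element while accumulating chksum.
def addChkSumGo : List Int → Int → (List Int × Int)
  | [], chksum => ([], chksum)
  | v :: t, chksum =>
      let v' := if v < 0 then -v + 128 else v
      let r := addChkSumGo t (chksum + v')
      (v' :: r.1, r.2)

def addChkSum (bin_list : List Int) : List Int :=
  let r := addChkSumGo bin_list 0
  r.1 ++ [PySem.Int.band r.2 255]

-- ===== PORT B =====
def addChkSum_alt (bin_list : List Int) : List Int :=
  let negs := bin_list.filter (fun v => v < 0)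
  let chksum := PySem.Int.band (bin_list.sum + 128 * negs.length - 2 * negs.sum) 255
  bin_list.map (fun v => if v < 0 then 128 - v else v) ++ [chksum]

-- ===== PRECONDITION & SPEC =====
def Spec_addChkSum (bin_list : List Int) (out : List Int) : Prop := out = addChkSum_alt bin_list
instance (bin_list : List Int) (out : List Int) : Decidable (Spec_addChkSum bin_list out) := by unfold Spec_addChkSum; infer_instance

-- ===== CLAIM (what is proved, stated in full; the proofs are below) =====
def Claim_equal_addChkSum : Prop := ∀ (bin_list : List Int), Dom_addChkSum bin_list → Spec_addChkSum bin_list (addChkSum bin_list)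

-- ===== LEMMAS AND PROOFS =====
theorem addChkSumGo_eq (l : List Int) (c : Int) :
    addChkSumGo l c =
      (l.map (fun v => if v < 0 then 128 - v else v),
       c + l.sum + 128 * (l.filter (fun v => v < 0)).length
         - 2 * (l.filter (fun v => v < 0)).sum) := by
  induction l generalizing c with
  | nil => simp [addChkSumGo]
  | cons v t ih =>
      simp only [addChkSumGo, ih, List.map_cons, List.sum_cons, List.filter_cons]
      by_cases h : v < 0 <;> simp [h]
      · constructor
        · omega
        · push_cast; ring
      · ring

-- ===== VERDICT (by name: the statement is the Claim_ definition above) =====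
theorem addChkSum_spec : Claim_equal_addChkSum := by
  intro l _
  unfold Spec_addChkSum addChkSum addChkSum_alt
  simp only [addChkSumGo_eq]
  norm_num
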